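-- pv_equiv track=rewrite | github.com/LucassTeixeiraN/JCRPROG | m10l/14.py | contar_pares
-- ===== SOURCE A (Python) =====
-- def contar_pares(lista):
--
--     if not lista:
--         return True
--
--     primeira_sublista = lista[0]
--     restantes_listas = lista[1:]
--
--     # Calcular a quantidade de zeros na primeira sublista
--     qnt_0 = sum(1 for x in primeira_sublista if x == 0)
--     metade = len(primeira_sublista) / 2
--
--     # Verifica se o número de zeros é maior que a metade do comprimento da sublista
--     if qnt_0 > metade:
--         return contar_pares(restantes_listas)
--     else:
--         return False
-- ===== SOURCE B (Python) =====
-- def contar_pares(lista):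
--     # single pass: every sublist must have strictly more zeros than half its length
--     return all(2 * sub.count(0) > len(sub) for sub in lista)
-- ===== Notes on version B (the rewrite author's own statement) =====
-- stated objective: simpler
-- what changed: Replaced the head/tail recursion with slicing by a single all() over the sublists, counting zeros with list.count and comparing 2*count > len in integers instead of count > len/2 in floats.
import Mathlib
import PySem

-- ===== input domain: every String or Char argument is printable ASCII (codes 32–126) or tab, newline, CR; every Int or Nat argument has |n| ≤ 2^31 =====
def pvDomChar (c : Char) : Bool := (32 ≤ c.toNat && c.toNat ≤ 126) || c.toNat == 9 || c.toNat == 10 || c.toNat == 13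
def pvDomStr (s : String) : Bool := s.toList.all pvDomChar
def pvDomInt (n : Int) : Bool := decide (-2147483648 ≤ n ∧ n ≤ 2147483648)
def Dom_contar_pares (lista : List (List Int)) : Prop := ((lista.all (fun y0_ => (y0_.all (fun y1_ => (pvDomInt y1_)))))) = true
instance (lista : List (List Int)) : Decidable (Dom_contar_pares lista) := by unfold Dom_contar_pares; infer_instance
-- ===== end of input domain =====

-- B replaces A's head/tail recursion over lista[1:] with a single all() over the
-- sublists, using list.count and an integer comparison 2*count > len; objective: simpler.


-- ===== PORT A =====
-- A: recursion on lista; counts zeros of the head with a 0/1 sum and compares to len/2.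
-- Python's float comparison qnt_0 > len/2 is exact here: ported as 2*qnt_0 > len (both ints).
def contar_pares (lista : List (List Int)) : Bool :=
  match lista with
  | [] => true
  | primeira :: restantes =>
    let qnt_0 : Int := primeira.foldl (fun acc x => if x == 0 then acc + 1 else acc) 0
    if 2 * qnt_0 > (primeira.length : Int) then contar_pares restantes else false

-- ===== PORT B =====
def contar_pares_alt (lista : List (List Int)) : Bool :=
  lista.all (fun sub => 2 * (PySem.List.count sub (0 : Int)) > (sub.length : Int))

-- ===== PRECONDITION & SPEC =====
def Spec_contar_pares (lista : List (List Int)) (out : Bool) : Prop := out = contar_pares_alt lista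
instance (lista : List (List Int)) (out : Bool) : Decidable (Spec_contar_pares lista out) := by unfold Spec_contar_pares; infer_instance

-- ===== CLAIM (what is proved, stated in full; the proofs are below) =====
def Claim_equal_contar_pares : Prop := ∀ (lista : List (List Int)), Dom_contar_pares lista → Spec_contar_pares lista (contar_pares lista)

-- ===== LEMMAS AND PROOFS =====
theorem contar_pares_eq_alt (lista : List (List Int)) :
    contar_pares lista = contar_pares_alt lista := by
  induction lista with
  | nil => rfl
  | cons sub rest ih =>
    simp only [contar_pares, contar_pares_alt, List.all_cons]
    rw [PySem.List.foldl_beq_add_one, PySem.List.count_eq]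
    by_cases h : 2 * ((0 : Int) + (sub.count 0 : Int)) > (sub.length : Int)
    · simp only [if_pos h, ih, contar_pares_alt]
      rw [decide_eq_true (by simpa using h)]
      simp
    · simp only [if_neg h]
      rw [decide_eq_false (by simpa using h)]
      simp

-- ===== VERDICT (by name: the statement is the Claim_ definition above) =====
theorem contar_pares_spec : Claim_equal_contar_pares := by
  intro lista _
  exact contar_pares_eq_alt lista
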